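-- pv_equiv track=rewrite | github.com/pallavisaxena0245/career-rag-coach | app/linkedin/stats_generator.py | _categorize_locations
-- ===== SOURCE A (Python) =====
-- from typing import Dict, List, Tuple
-- from collections import Counter, defaultdict
--
-- def _categorize_locations(locations: Dict) -> Dict:
--     """Categorize locations by region/type."""
--     categories = {
--         'West Coast': ['San Francisco, CA', 'Seattle, WA', 'Los Angeles, CA', 'Portland, OR'],
--         'East Coast': ['New York, NY', 'Boston, MA', 'Washington, DC', 'Philadelphia, PA'],
--         'Central': ['Chicago, IL', 'Austin, TX', 'Denver, CO', 'Dallas, TX'],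
--         'Remote': ['Remote']
--     }
--
--     categorized = defaultdict(int)
--
--     for location, count in locations.items():
--         categorized_location = False
--         for category, cities in categories.items():
--             if location in cities:
--                 categorized[category] += count
--                 categorized_location = True
--                 break
--
--         if not categorized_location:
--             categorized['Other'] += count
--
--     return dict(categorized)
-- ===== SOURCE B (Python) =====
-- from typing import Dict
--
-- # city -> region inverted index, built once from the fixed table
-- _CITY_TO_REGION = {
--     city: region
--     for region, cities in {
--         'West Coast': ['San Francisco, CA', 'Seattle, WA', 'Los Angeles, CA', 'Portland, OR'],
--         'East Coast': ['New York, NY', 'Boston, MA', 'Washington, DC', 'Philadelphia, PA'],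
--         'Central': ['Chicago, IL', 'Austin, TX', 'Denver, CO', 'Dallas, TX'],
--         'Remote': ['Remote'],
--     }.items()
--     for city in cities
-- }
--
-- def _categorize_locations(locations: Dict) -> Dict:
--     """Categorize locations by region/type."""
--     # Stage 1: tag every location with its region (one index lookup each;
--     # no inner loop over categories, no running accumulator).
--     tagged = [(_CITY_TO_REGION.get(location, 'Other'), count)
--               for location, count in locations.items()]
--     # Stage 2: region output order = order of first occurrence.
--     order = dict.fromkeys(region for region, _ in tagged)
--     # Stage 3: grouped sums per region.
--     return {region: sum(c for r, c in tagged if r == region) for region in order}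
-- ===== Notes on version B (the rewrite author's own statement) =====
-- stated objective: alternative
-- what changed: Replaced A's single pass with a defaultdict accumulator and an inner first-match scan over the categories table by a staged map/group-by: tag each location with its region via a city->region inverted index built once, take the regions' first-occurrence order with dict.fromkeys, and build the result as one grouped-sum comprehension per region (no running totals, no inner category loop).
import Mathlib
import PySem

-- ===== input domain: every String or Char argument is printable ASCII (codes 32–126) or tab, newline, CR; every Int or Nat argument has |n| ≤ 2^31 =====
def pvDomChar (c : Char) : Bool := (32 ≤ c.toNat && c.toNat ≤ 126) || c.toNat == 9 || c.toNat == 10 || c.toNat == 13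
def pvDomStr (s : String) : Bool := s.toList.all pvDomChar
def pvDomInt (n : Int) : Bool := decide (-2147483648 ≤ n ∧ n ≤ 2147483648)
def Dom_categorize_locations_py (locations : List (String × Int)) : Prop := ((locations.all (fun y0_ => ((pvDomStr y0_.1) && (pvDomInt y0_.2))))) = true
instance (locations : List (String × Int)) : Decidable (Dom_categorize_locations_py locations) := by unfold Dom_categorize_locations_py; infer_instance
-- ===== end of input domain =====

-- B replaces A's accumulator pass with an inner category scan by a staged map / dedup-order /
-- grouped-sum computation over a city->region inverted index; objective: alternative.

-- ===== PORT A =====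
def pvCategories : List (String × List String) :=
  [("West Coast", ["San Francisco, CA", "Seattle, WA", "Los Angeles, CA", "Portland, OR"]),
   ("East Coast", ["New York, NY", "Boston, MA", "Washington, DC", "Philadelphia, PA"]),
   ("Central", ["Chicago, IL", "Austin, TX", "Denver, CO", "Dallas, TX"]),
   ("Remote", ["Remote"])]

-- the inner 'for category, cities … if location in cities: …; break' loop with its flag,
-- folded with the trailing 'if not categorized_location' into the [] case
def pvInnerA (d : PySem.Dict String Int) (location : String) (count : Int) :
    List (String × List String) → PySem.Dict String Int
  | [] => d.modify "Other" 0 (· + count)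
  | (category, cities) :: rest =>
      if cities.contains location then d.modify category 0 (· + count)
      else pvInnerA d location count rest

def categorize_locations_py (locations : List (String × Int)) : List (String × Int) :=
  (locations.foldl (fun d p => pvInnerA d p.1 p.2 pvCategories) PySem.Dict.empty).items

-- ===== PORT B =====
def pvCityToRegion : PySem.Dict String String :=
  pvCategoriesB.foldl (fun d p => p.2.foldl (fun d city => d.insert city p.1) d) PySem.Dict.empty
where pvCategoriesB : List (String × List String) :=
  [("West Coast", ["San Francisco, CA", "Seattle, WA", "Los Angeles, CA", "Portland, OR"]),
   ("East Coast", ["New York, NY", "Boston, MA", "Washington, DC", "Philadelphia, PA"]),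
   ("Central", ["Chicago, IL", "Austin, TX", "Denver, CO", "Dallas, TX"]),
   ("Remote", ["Remote"])]

def categorize_locations_py_alt (locations : List (String × Int)) : List (String × Int) :=
  let tagged := locations.map (fun p => (pvCityToRegion.getD p.1 "Other", p.2))
  let order := PySem.List.dedup (tagged.map Prod.fst)
  order.map (fun region => (region, ((tagged.filter (fun p => p.1 == region)).map Prod.snd).sum))

-- ===== PRECONDITION & SPEC =====
def Spec_categorize_locations_py (locations : List (String × Int)) (out : List (String × Int)) : Prop := out = categorize_locations_py_alt locations
instance (locations : List (String × Int)) (out : List (String × Int)) : Decidable (Spec_categorize_locations_py locations out) := by unfold Spec_categorize_locations_py; infer_instance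

-- ===== CLAIM (what is proved, stated in full; the proofs are below) =====
def Claim_equal_categorize_locations_py : Prop := ∀ (locations : List (String × Int)), Dom_categorize_locations_py locations → Spec_categorize_locations_py locations (categorize_locations_py locations)

-- ===== LEMMAS AND PROOFS =====

-- proof-side helper: the bucket A's first-match scan chooses
def pvBucketOf (location : String) : List (String × List String) → String
  | [] => "Other"
  | (category, cities) :: rest =>
      if cities.contains location then category else pvBucketOf location rest

theorem pvInnerA_eq (cats : List (String × List String)) (d : PySem.Dict String Int)
    (loc : String) (c : Int) :
    pvInnerA d loc c cats = d.modify (pvBucketOf loc cats) 0 (· + c) := by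
  induction cats with
  | nil => rfl
  | cons hd tl ih =>
      obtain ⟨category, cities⟩ := hd
      simp only [pvInnerA, pvBucketOf]
      split_ifs <;> simp [ih]

-- B's inverted-index lookup picks the same bucket as A's first-match scan
theorem pvLookup_eq (loc : String) :
    pvCityToRegion.getD loc "Other" = pvBucketOf loc pvCategories := by
  have hinv : pvCityToRegion = PySem.Dict.mk
    [("San Francisco, CA","West Coast"),("Seattle, WA","West Coast"),("Los Angeles, CA","West Coast"),("Portland, OR","West Coast"),
     ("New York, NY","East Coast"),("Boston, MA","East Coast"),("Washington, DC","East Coast"),("Philadelphia, PA","East Coast"),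
     ("Chicago, IL","Central"),("Austin, TX","Central"),("Denver, CO","Central"),("Dallas, TX","Central"),
     ("Remote","Remote")] := by decide
  rw [hinv]
  by_cases h1 : loc = "San Francisco, CA"; · subst h1; rfl
  by_cases h2 : loc = "Seattle, WA"; · subst h2; rfl
  by_cases h3 : loc = "Los Angeles, CA"; · subst h3; rfl
  by_cases h4 : loc = "Portland, OR"; · subst h4; rfl
  by_cases h5 : loc = "New York, NY"; · subst h5; rfl
  by_cases h6 : loc = "Boston, MA"; · subst h6; rfl
  by_cases h7 : loc = "Washington, DC"; · subst h7; rfl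
  by_cases h8 : loc = "Philadelphia, PA"; · subst h8; rfl
  by_cases h9 : loc = "Chicago, IL"; · subst h9; rfl
  by_cases h10 : loc = "Austin, TX"; · subst h10; rfl
  by_cases h11 : loc = "Denver, CO"; · subst h11; rfl
  by_cases h12 : loc = "Dallas, TX"; · subst h12; rfl
  by_cases h13 : loc = "Remote"; · subst h13; rfl
  simp [pvBucketOf, pvCategories, PySem.Dict.getD, PySem.Dict.get?,
    h1,h2,h3,h4,h5,h6,h7,h8,h9,h10,h11,h12,h13,
    Ne.symm h1, Ne.symm h2, Ne.symm h3, Ne.symm h4, Ne.symm h5, Ne.symm h6, Ne.symm h7,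
    Ne.symm h8, Ne.symm h9, Ne.symm h10, Ne.symm h11, Ne.symm h12, Ne.symm h13]

-- running-accumulator value at a key = grouped sum of the processed pairs at that key
theorem pvGetD_fold_sum (l : List (String × Int)) (d : PySem.Dict String Int) (b : String) :
    (l.foldl (fun d p => d.modify p.1 0 (· + p.2)) d).getD b 0
      = d.getD b 0 + ((l.filter (fun p => p.1 == b)).map Prod.snd).sum := by
  induction l generalizing d with
  | nil => simp
  | cons p l ih =>
      simp only [List.foldl_cons, ih, PySem.Dict.getD_modify, List.filter_cons]
      by_cases h : p.1 = b
      · simp [h, add_assoc]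
      · simp [h, Ne.symm h]

theorem categorize_locations_py_spec : Claim_equal_categorize_locations_py := by
  intro locations _
  unfold Spec_categorize_locations_py categorize_locations_py categorize_locations_py_alt
  -- A's step = modify at B's bucket
  have hf : (fun (d : PySem.Dict String Int) (p : String × Int) => pvInnerA d p.1 p.2 pvCategories)
      = (fun (d : PySem.Dict String Int) (p : String × Int) =>
          d.modify (pvCityToRegion.getD p.1 "Other") 0 (· + p.2)) := by
    funext d p
    rw [pvInnerA_eq, pvLookup_eq]
  rw [hf]
  -- turn A's fold over locations into a fold over B's tagged list
  set tagged := locations.map (fun p => (pvCityToRegion.getD p.1 "Other", p.2)) with htag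
  have hfold : locations.foldl
      (fun (d : PySem.Dict String Int) (p : String × Int) =>
        d.modify (pvCityToRegion.getD p.1 "Other") 0 (· + p.2)) PySem.Dict.empty
      = tagged.foldl (fun d q => d.modify q.1 0 (· + q.2)) PySem.Dict.empty := by
    rw [htag, List.foldl_map]
  rw [hfold]
  -- keys of the fold: first occurrences of the tags, Nodup
  have hkeys : (tagged.foldl (fun d q => d.modify q.1 0 (· + q.2)) PySem.Dict.empty).keys
      = PySem.List.dedup (tagged.map Prod.fst) := by
    rw [show (fun (d : PySem.Dict String Int) (q : String × Int) => d.modify q.1 0 (· + q.2))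
        = (fun (d : PySem.Dict String Int) (q : String × Int) =>
            d.modify (Prod.fst q) 0 ((fun (_ : PySem.Dict String Int) (q : String × Int)
              (v : Int) => v + q.2) d q)) from rfl,
      PySem.Dict.keys_foldl_modify_key]
    simp [PySem.Set.update_nil_left]
  have hnd : (tagged.foldl (fun d q => d.modify q.1 0 (· + q.2)) PySem.Dict.empty).keys.Nodup := by
    rw [hkeys]; exact PySem.List.nodup_dedup _
  rw [PySem.Dict.items_eq_map_keys _ hnd 0, hkeys]
  refine List.map_congr_left (fun b _ => ?_)
  rw [pvGetD_fold_sum]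
  simp
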